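-- pv_equiv track=rewrite | github.com/BrunoSauvalle/AST | MF_models_encoder.py | compute_output_paddings
-- ===== SOURCE A (Python) =====
-- def compute_output_paddings(image_height,image_width,n_layers):
--
--     output_paddings = []  # output paddings value for transpose convolutions
--
--     current_w = image_width
--     current_h = image_height
--
--     for i in range(n_layers):
--
--         pad_w = 1
--         pad_h = 1
--         str_w = 2
--         str_h = 2
--         ker_w = 4
--         ker_h = 4
--
--         new_w = 1 + (current_w + 2 * pad_w - ker_w) // str_w
--         output_pad_w = (current_w + 2 * pad_w - ker_w) % str_w
--
--         new_h = 1 + (current_h + 2 * pad_h - ker_h) // str_h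
--         output_pad_h = (current_h + 2 * pad_h - ker_h) % str_h
--
--         output_paddings.append((output_pad_h, output_pad_w))
--
--         current_h = new_h
--         current_w = new_w
--
--
--     return output_paddings
-- ===== SOURCE B (Python) =====
-- def compute_output_paddings(image_height, image_width, n_layers):
--     # closed form: with kernel 4 / stride 2 / pad 1, layer i's output padding
--     # pair is just the i-th low bit of each dimension (floor-halving extracts bits)
--     return [((image_height >> i) & 1, (image_width >> i) & 1)
--             for i in range(n_layers)]
-- ===== Notes on version B (the rewrite author's own statement) =====
-- stated objective: simpler
-- what changed: Replaced the stateful halving loop (current_h/current_w carried across layers) with a stateless closed-form comprehension reading layer i's padding pair directly as bit i of each dimension ((x >> i) & 1).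
import Mathlib
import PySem

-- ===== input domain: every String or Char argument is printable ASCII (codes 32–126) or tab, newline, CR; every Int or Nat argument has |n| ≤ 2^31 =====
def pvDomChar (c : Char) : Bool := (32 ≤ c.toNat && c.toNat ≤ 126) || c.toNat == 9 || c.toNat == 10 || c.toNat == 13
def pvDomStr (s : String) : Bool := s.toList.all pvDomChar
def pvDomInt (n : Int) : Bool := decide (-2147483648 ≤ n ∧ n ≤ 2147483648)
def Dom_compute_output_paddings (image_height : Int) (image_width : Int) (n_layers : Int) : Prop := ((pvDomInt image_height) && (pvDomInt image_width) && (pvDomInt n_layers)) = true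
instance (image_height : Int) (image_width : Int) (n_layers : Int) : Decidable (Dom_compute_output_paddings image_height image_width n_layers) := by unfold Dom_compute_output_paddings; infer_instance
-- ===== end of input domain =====

-- B replaces A's stateful per-layer halving loop by a stateless closed-form
-- comprehension reading layer i's pair as bit i of each dimension, (x >> i) & 1 (objective: simpler).

-- ===== PORT A =====
-- loop state mirrors (current_h, current_w, output_paddings)
def compute_output_paddings (image_height : Int) (image_width : Int) (n_layers : Int) : List (Int × Int) :=
  let st := (PySem.List.pyRange 0 n_layers 1).foldl
    (fun (st : Int × Int × List (Int × Int)) _i =>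
      let current_h := st.1
      let current_w := st.2.1
      let output_paddings := st.2.2
      let pad_w : Int := 1
      let pad_h : Int := 1
      let str_w : Int := 2
      let str_h : Int := 2
      let ker_w : Int := 4
      let ker_h : Int := 4
      let new_w := 1 + PySem.Int.floordiv (current_w + 2 * pad_w - ker_w) str_w
      let output_pad_w := PySem.Int.mod (current_w + 2 * pad_w - ker_w) str_w
      let new_h := 1 + PySem.Int.floordiv (current_h + 2 * pad_h - ker_h) str_h
      let output_pad_h := PySem.Int.mod (current_h + 2 * pad_h - ker_h) str_h
      (new_h, new_w, output_paddings ++ [(output_pad_h, output_pad_w)]))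
    (image_height, image_width, [])
  st.2.2

-- ===== PORT B =====
def compute_output_paddings_alt (image_height : Int) (image_width : Int) (n_layers : Int) : List (Int × Int) :=
  (PySem.List.pyRange 0 n_layers 1).map
    (fun i => (PySem.Int.band (image_height >>> i.toNat) 1,
               PySem.Int.band (image_width >>> i.toNat) 1))

-- ===== PRECONDITION & SPEC =====
def Spec_compute_output_paddings (image_height : Int) (image_width : Int) (n_layers : Int) (out : List (Int × Int)) : Prop := out = compute_output_paddings_alt image_height image_width n_layers
instance (image_height : Int) (image_width : Int) (n_layers : Int) (out : List (Int × Int)) : Decidable (Spec_compute_output_paddings image_height image_width n_layers out) := by unfold Spec_compute_output_paddings; infer_instance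

-- ===== CLAIM (what is proved, stated in full; the proofs are below) =====
def Claim_equal_compute_output_paddings : Prop := ∀ (image_height : Int) (image_width : Int) (n_layers : Int), Dom_compute_output_paddings image_height image_width n_layers → Spec_compute_output_paddings image_height image_width n_layers (compute_output_paddings image_height image_width n_layers)

-- ===== LEMMAS AND PROOFS =====

-- A's step on a dimension value c: the pad is c % 2 and the new value is c // 2
theorem pv_pad_eq (c : Int) : PySem.Int.mod (c + 2 * 1 - 4) 2 = c % 2 := by
  rw [PySem.Int.mod_eq_emod_of_pos (by omega)]; omega

theorem pv_new_eq (c : Int) : 1 + PySem.Int.floordiv (c + 2 * 1 - 4) 2 = c / 2 := by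
  rw [PySem.Int.floordiv_eq_ediv_of_pos (by omega)]; omega

-- B's element: (c >> k) & 1 is the Euclidean bit c / 2^k % 2
theorem pv_bit_eq (c : Int) (k : Nat) :
    PySem.Int.band (c >>> k) 1 = c / 2 ^ k % 2 := by
  rw [PySem.Int.band_one, PySem.Int.mod_eq_emod_of_pos (by omega), Int.shiftRight_eq_div_pow]
  push_cast
  rfl

theorem pv_ediv_pow (c : Int) (m : Nat) : c / 2 / 2 ^ m = c / 2 ^ (m + 1) := by
  rw [Int.ediv_ediv_of_nonneg (by omega)]; ring_nf

-- invariant of A's fold (the loop variable is unused, so only the index list's length matters):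
-- the running state is (h / 2^len, w / 2^len) and the output collects the successive low bits
theorem pv_fold_inv (l : List Int) (h w : Int) (acc : List (Int × Int)) :
    (l.foldl
      (fun (st : Int × Int × List (Int × Int)) _i =>
        (st.1 / 2, st.2.1 / 2, st.2.2 ++ [(st.1 % 2, st.2.1 % 2)]))
      (h, w, acc))
    = (h / 2 ^ l.length, w / 2 ^ l.length,
       acc ++ (List.range l.length).map (fun k => (h / 2 ^ k % 2, w / 2 ^ k % 2))) := by
  induction l generalizing h w acc with
  | nil => simp
  | cons x l ih =>
      rw [List.foldl_cons, ih]
      refine Prod.ext ?_ (Prod.ext ?_ ?_)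
      · simp [pv_ediv_pow]
      · simp [pv_ediv_pow]
      · simp only [List.length_cons, List.range_succ_eq_map, List.map_cons, List.map_map]
        simp [Function.comp_def, pv_ediv_pow, List.append_assoc]

-- ===== VERDICT (by name: the statement is the Claim_ definition above) =====
theorem compute_output_paddings_spec : Claim_equal_compute_output_paddings := by
  intro h w n _
  show compute_output_paddings h w n = compute_output_paddings_alt h w n
  unfold compute_output_paddings compute_output_paddings_alt
  rw [PySem.List.pyRange_one]
  simp only [sub_zero, zero_add, pv_new_eq, pv_pad_eq]
  rw [pv_fold_inv]
  simp only [List.nil_append, List.map_map, List.length_map, List.length_range]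
  refine List.map_congr_left ?_ |>.symm
  intro k _
  simp only [Function.comp_apply, Int.toNat_natCast, Int.shiftRight_natCast_right, pv_bit_eq]
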